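-- pv_equiv track=rewrite | github.com/k164596848/action_learning_project | action-learning/core/action.py | to_frames
-- ===== SOURCE A (Python) =====
-- from typing import Dict, List, Set
--
-- def to_frames(data: List[float]) -> List[float]:
--     """Convert data (durations / counts) to frames for video drawing"""
--     if not data:
--         return []
--     cbt = []
--     counter = 0
--     for times in range(data[-1] + 1):
--         if times in data:
--             counter += 1
--         cbt.append(counter)
--     return cbt
-- ===== SOURCE B (Python) =====
-- def to_frames(data):
--     """Convert data (durations / counts) to frames for video drawing"""
--     if not data:
--         return []
--     last = data[-1]
--     vs = sorted(v for v in set(data) if 0 <= v <= last)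
--     res = []
--     count = 0
--     prev = 0
--     for v in vs:
--         res += [count] * (v - prev)
--         count += 1
--         prev = v
--     res += [count] * (last + 1 - prev)
--     return res
-- ===== Notes on version B (the rewrite author's own statement) =====
-- stated objective: faster
-- what changed: Instead of scanning every frame index 0..data[-1] and testing membership in data, B sorts the distinct in-range values once and emits the output as run-length blocks ([count]*(gap)) between consecutive values, never testing membership per index.
import Mathlib
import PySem

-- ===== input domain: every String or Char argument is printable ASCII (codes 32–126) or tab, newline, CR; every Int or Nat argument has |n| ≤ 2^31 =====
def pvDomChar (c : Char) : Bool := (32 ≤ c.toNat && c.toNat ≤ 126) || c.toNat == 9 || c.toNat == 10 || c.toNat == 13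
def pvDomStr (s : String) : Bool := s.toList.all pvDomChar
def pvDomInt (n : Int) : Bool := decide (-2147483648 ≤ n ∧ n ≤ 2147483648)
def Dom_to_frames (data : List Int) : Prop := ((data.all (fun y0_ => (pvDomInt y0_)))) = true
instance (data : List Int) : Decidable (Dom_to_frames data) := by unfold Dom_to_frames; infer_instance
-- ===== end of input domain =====

-- B replaces A's per-index membership scan over range(data[-1]+1) by sorting the distinct
-- in-range values and emitting the answer as run-length blocks between consecutive values.

-- ===== PORT A =====
def to_frames (data : List Int) : List Int :=
  if data = [] then []
  else
    let last := (PySem.List.pyGet? data (-1)).getD 0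
    ((PySem.List.pyRange 0 (last + 1) 1).foldl
      (fun (st : Int × List Int) times =>
        let counter := if times ∈ data then st.1 + 1 else st.1
        (counter, st.2 ++ [counter]))
      (0, [])).2

-- ===== PORT B =====
def to_frames_alt (data : List Int) : List Int :=
  if data = [] then []
  else
    let last := (PySem.List.pyGet? data (-1)).getD 0
    let vs := PySem.List.sorted
      (((PySem.Set.ofList data : List Int)).filter (fun v => decide (0 ≤ v ∧ v ≤ last)))
      (fun x => x) false
    let st := vs.foldl
      (fun (st : Int × Int × List Int) v =>
        (v, st.2.1 + 1, st.2.2 ++ List.replicate (v - st.1).toNat st.2.1))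
      (0, 0, [])
    st.2.2 ++ List.replicate (last + 1 - st.1).toNat st.2.1

-- ===== PRECONDITION & SPEC =====
def Spec_to_frames (data : List Int) (out : List Int) : Prop := out = to_frames_alt data
instance (data : List Int) (out : List Int) : Decidable (Spec_to_frames data out) := by unfold Spec_to_frames; infer_instance

-- ===== CLAIM (what is proved, stated in full; the proofs are below) =====
def Claim_equal_to_frames : Prop := ∀ (data : List Int), Dom_to_frames data → Spec_to_frames data (to_frames data)

-- ===== LEMMAS AND PROOFS =====

-- running-counter list produced by A's loop
def runCount (p : Int → Prop) [DecidablePred p] : List Int → Int → List Int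
  | [], _ => []
  | t :: ts, c =>
    let c' := if p t then c + 1 else c
    c' :: runCount p ts c'

theorem foldA_eq_runCount (p : Int → Prop) [DecidablePred p]
    (l : List Int) (c : Int) (acc : List Int) :
    (l.foldl (fun (st : Int × List Int) t =>
        let c' := if p t then st.1 + 1 else st.1
        (c', st.2 ++ [c'])) (c, acc)).2
      = acc ++ runCount p l c := by
  induction l generalizing c acc with
  | nil => simp [runCount]
  | cons t ts ih => by_cases h : p t <;> simp [runCount, h, ih]

theorem runCount_eq_map_aux (p : Int → Prop) [DecidablePred p] :
    ∀ (n : Nat) (a c : Int),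
      runCount p (PySem.List.pyRange a (a + n) 1) c
        = (PySem.List.pyRange a (a + n) 1).map
            (fun t => c + ((PySem.List.pyRange a (t + 1) 1).countP (fun s => decide (p s)) : Int)) := by
  intro n
  induction n with
  | zero =>
    intro a c
    rw [show a + (0 : Nat) = a by simp, PySem.List.pyRange_one_eq_nil (le_refl a)]
    simp [runCount]
  | succ m ih =>
    intro a c
    have hab : a < a + ((m : Nat) + 1 : Nat) := by push_cast; omega
    rw [PySem.List.pyRange_one_cons hab]
    have hshift : (a : Int) + ((m : Nat) + 1 : Nat) = (a + 1) + (m : Nat) := by push_cast; ring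
    simp only [runCount, List.map_cons]
    rw [hshift, ih (a + 1)]
    have hhead : ((PySem.List.pyRange a (a + 1) 1).countP (fun s => decide (p s)) : Int)
        = (if p a then 1 else 0) := by
      rw [PySem.List.pyRange_one_singleton]
      by_cases h : p a <;> simp [h, List.countP, List.countP.go]
    congr 1
    · rw [hhead]; by_cases h : p a <;> simp [h]
    · apply List.map_congr_left
      intro t ht
      have hat : a + 1 ≤ t := (PySem.List.mem_pyRange_one.mp ht).1
      have hsplit : PySem.List.pyRange a (t + 1) 1
          = a :: PySem.List.pyRange (a + 1) (t + 1) 1 :=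
        PySem.List.pyRange_one_cons (by omega)
      rw [hsplit]
      by_cases h : p a <;> simp [h] <;> omega

theorem runCount_eq_map (p : Int → Prop) [DecidablePred p] (a b c : Int) :
    runCount p (PySem.List.pyRange a b 1) c
      = (PySem.List.pyRange a b 1).map
          (fun t => c + ((PySem.List.pyRange a (t + 1) 1).countP (fun s => decide (p s)) : Int)) := by
  by_cases h : b ≤ a
  · rw [PySem.List.pyRange_one_eq_nil h]; simp [runCount]
  · have hb : b = a + ((b - a).toNat : Nat) := by omega
    rw [hb]; exact runCount_eq_map_aux p (b - a).toNat a c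

-- B's block construction produces, position by position, the count of values ≤ the index
theorem blocks_eq_map (last : Int) :
    ∀ (vs : List Int) (prev c : Int) (res : List Int),
      vs.Pairwise (· < ·) →
      (∀ v ∈ vs, prev ≤ v ∧ v < last + 1) →
      (let st := vs.foldl
          (fun (st : Int × Int × List Int) v =>
            (v, st.2.1 + 1, st.2.2 ++ List.replicate (v - st.1).toNat st.2.1))
          (prev, c, res)
       st.2.2 ++ List.replicate (last + 1 - st.1).toNat st.2.1)
        = res ++ (PySem.List.pyRange prev (last + 1) 1).map
            (fun t => c + (vs.countP (fun v => decide (v ≤ t)) : Int)) := by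
  intro vs
  induction vs with
  | nil =>
    intro prev c res _ _
    simp only [List.foldl]
    simp [List.map_const', PySem.List.length_pyRange_one]
  | cons v tail ih =>
    intro prev c res hpw hmem
    have hv := hmem v (List.mem_cons_self ..)
    have htailpw : tail.Pairwise (· < ·) := hpw.of_cons
    have hvlt : ∀ w ∈ tail, v < w := by
      intro w hw; exact (List.pairwise_cons.mp hpw).1 w hw
    have htailmem : ∀ w ∈ tail, v ≤ w ∧ w < last + 1 := by
      intro w hw
      exact ⟨le_of_lt (hvlt w hw), (hmem w (List.mem_cons_of_mem _ hw)).2⟩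
    simp only [List.foldl]
    rw [ih v (c + 1) (res ++ List.replicate (v - prev).toNat c) htailpw htailmem]
    rw [List.append_assoc]
    congr 1
    rw [PySem.List.pyRange_one_append prev v (last + 1) hv.1 (le_of_lt hv.2)]
    rw [List.map_append]
    congr 1
    · -- indices below v: no value counted yet
      have : ∀ t ∈ PySem.List.pyRange prev v 1,
          (fun t => c + (((v :: tail).countP (fun w => decide (w ≤ t))) : Int)) t = c := by
        intro t ht
        have htv : t < v := (PySem.List.mem_pyRange_one.mp ht).2
        have : (v :: tail).countP (fun w => decide (w ≤ t)) = 0 := by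
          rw [List.countP_eq_zero]
          intro w hw
          rcases List.mem_cons.mp hw with rfl | hw'
          · simp; omega
          · have := hvlt w hw'; simp; omega
        simp [this]
      rw [List.map_congr_left this]
      simp [List.map_const', PySem.List.length_pyRange_one]
    · -- indices from v on: v is counted
      apply List.map_congr_left
      intro t ht
      have hvt : v ≤ t := (PySem.List.mem_pyRange_one.mp ht).1
      rw [List.countP_cons]
      simp [hvt]
      omega

-- the bridge: counting sorted distinct in-range values ≤ t equals counting range points in data
theorem count_bridge (data : List Int) (last t : Int) (h0 : 0 ≤ t) (hlast : t ≤ last) :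
    ((PySem.List.sorted
        (((PySem.Set.ofList data : List Int)).filter (fun v => decide (0 ≤ v ∧ v ≤ last)))
        (fun x => x) false).countP (fun v => decide (v ≤ t)))
      = (PySem.List.pyRange 0 (t + 1) 1).countP (fun s => decide (s ∈ data)) := by
  rw [List.countP_eq_length_filter, List.countP_eq_length_filter]
  apply List.Perm.length_eq
  have hnd1 : (PySem.List.sorted
      (((PySem.Set.ofList data : List Int)).filter (fun v => decide (0 ≤ v ∧ v ≤ last)))
      (fun x => x) false).Nodup := by
    have : (((PySem.Set.ofList data : List Int)).filter
        (fun v => decide (0 ≤ v ∧ v ≤ last))).Nodup :=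
      (PySem.Set.nodup_ofList data).filter _
    exact (PySem.List.sorted_perm _ _ _).nodup_iff.mpr this
  have hnd2 : (PySem.List.pyRange 0 (t + 1) 1).Nodup := PySem.List.nodup_pyRange_one 0 (t + 1)
  rw [List.perm_ext_iff_of_nodup (hnd1.filter _) (hnd2.filter _)]
  intro x
  simp only [List.mem_filter, PySem.List.mem_sorted, PySem.Set.mem_ofList,
    PySem.List.mem_pyRange_one, decide_eq_true_eq]
  constructor
  · rintro ⟨⟨hx, h1, h2⟩, h3⟩
    exact ⟨⟨h1, by omega⟩, hx⟩
  · rintro ⟨⟨h0, h1⟩, hx⟩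
    exact ⟨⟨hx, h0, by omega⟩, by omega⟩

theorem sorted_filter_pairwise_lt (data : List Int) (last : Int) :
    (PySem.List.sorted
        (((PySem.Set.ofList data : List Int)).filter (fun v => decide (0 ≤ v ∧ v ≤ last)))
        (fun x => x) false).Pairwise (· < ·) := by
  have hnd : (PySem.List.sorted
      (((PySem.Set.ofList data : List Int)).filter (fun v => decide (0 ≤ v ∧ v ≤ last)))
      (fun x => x) false).Nodup := by
    have : (((PySem.Set.ofList data : List Int)).filter
        (fun v => decide (0 ≤ v ∧ v ≤ last))).Nodup :=
      (PySem.Set.nodup_ofList data).filter _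
    exact (PySem.List.sorted_perm _ _ _).nodup_iff.mpr this
  have hle : (PySem.List.sorted
      (((PySem.Set.ofList data : List Int)).filter (fun v => decide (0 ≤ v ∧ v ≤ last)))
      (fun x => x) false).Pairwise (fun a b => a ≤ b) := by
    simpa using PySem.List.sorted_pairwise
      (((PySem.Set.ofList data : List Int)).filter (fun v => decide (0 ≤ v ∧ v ≤ last)))
      (fun x => x)
  exact (hle.and hnd).imp (fun h => lt_of_le_of_ne h.1 h.2)

-- ===== VERDICT (by name: the statement is the Claim_ definition above) =====
theorem to_frames_spec : Claim_equal_to_frames := by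
  intro data _
  unfold Spec_to_frames to_frames to_frames_alt
  by_cases hnil : data = []
  · simp [hnil]
  · simp only [hnil]
    set last := (PySem.List.pyGet? data (-1)).getD 0 with hlast
    set vs := PySem.List.sorted
      (((PySem.Set.ofList data : List Int)).filter (fun v => decide (0 ≤ v ∧ v ≤ last)))
      (fun x => x) false with hvs
    have hmem : ∀ v ∈ vs, (0 : Int) ≤ v ∧ v < last + 1 := by
      intro v hv
      rw [hvs, PySem.List.mem_sorted, List.mem_filter] at hv
      have := hv.2; simp at this; omega
    rw [foldA_eq_runCount (fun t => t ∈ data),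
        runCount_eq_map (fun t => t ∈ data) 0 (last + 1) 0,
        blocks_eq_map last vs 0 0 [] (sorted_filter_pairwise_lt data last) hmem]
    simp only [List.nil_append]
    apply List.map_congr_left
    intro t ht
    have := PySem.List.mem_pyRange_one.mp ht
    rw [count_bridge data last t this.1 (by omega)]
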